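-- pv_equiv track=rewrite | github.com/ChengyueLiu/binary-v-confirmer | main/extractors/bin_function_feature_extractor/objdump_parser.py | split_asm_functions
-- ===== SOURCE A (Python) =====
-- def split_asm_functions(text_section_lines):
--     function_lines_dict = {}
--     cur_function_name = None
--     for line in text_section_lines:
--         if " <" in line and line.endswith(">:\n"):
--             cur_function_name = line.split()[1][1:-2]
--             if '.' in cur_function_name:
--                 cur_function_name = cur_function_name.split('.')[0]
--             cur_function_name = cur_function_name.strip()
--             function_lines_dict[cur_function_name] = []
--             continue
--
--         if cur_function_name is None:
--             continue
--
--         function_lines_dict[cur_function_name].append(line)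
--
--     return function_lines_dict
-- ===== SOURCE B (Python) =====
-- def split_asm_functions(text_section_lines):
--     def _is_header(line):
--         return " <" in line and line.endswith(">:\n")
--
--     def _name(line):
--         name = line.split()[1][1:-2]
--         if '.' in name:
--             name = name.split('.')[0]
--         return name.strip()
--
--     # one backward pass: collect (name, body) segments back-to-front;
--     # `pending` holds the current segment's lines in reversed order
--     pairs = []
--     pending = []
--     for line in reversed(text_section_lines):
--         if _is_header(line):
--             pairs.append((_name(line), pending[::-1]))
--             pending = []
--         else:
--             pending.append(line)
--     # lines before the first header (left in `pending`) are dropped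
--     d = {}
--     for name, body in reversed(pairs):
--         d[name] = body
--     return d
-- ===== Notes on version B (the rewrite author's own statement) =====
-- stated objective: alternative
-- what changed: Replaces the forward scan that mutates a current-function list inside the dict on every line by a single backward pass that accumulates each function body as a pending segment, emits (name, body) pairs at headers, and builds the dict from the pairs afterwards.
import Mathlib
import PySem

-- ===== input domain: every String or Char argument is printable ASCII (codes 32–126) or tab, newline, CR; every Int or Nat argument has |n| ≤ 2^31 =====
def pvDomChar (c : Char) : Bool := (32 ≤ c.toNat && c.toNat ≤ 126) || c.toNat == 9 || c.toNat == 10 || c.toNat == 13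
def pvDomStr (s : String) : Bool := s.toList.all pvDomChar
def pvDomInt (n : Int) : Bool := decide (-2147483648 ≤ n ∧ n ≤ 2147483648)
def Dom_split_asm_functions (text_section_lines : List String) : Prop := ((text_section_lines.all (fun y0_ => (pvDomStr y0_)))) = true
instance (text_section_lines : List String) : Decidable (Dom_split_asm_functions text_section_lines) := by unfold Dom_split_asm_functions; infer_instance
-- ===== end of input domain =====

-- B is an alternative decomposition: one backward pass collecting (name, body) segments, then a dict built from the pairs; return-value equivalence only (A mutates no argument).

-- ===== PORT A =====
-- shared helpers: the header test and name parsing are textually identical in A and B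
def pvIsHeader (line : String) : Bool :=
  PySem.Str.isIn " <" line && PySem.Str.endswith line ">:\n"

-- line.split()[1][1:-2], then split('.')[0] if '.' present, then strip();
-- the [1] index is exact under Pre_ (the split list has ≥ 2 elements there)
def pvName (line : String) : String :=
  let t := PySem.Str.slice (PySem.List.pyGetD (PySem.Str.split₀ line) 1 "") (some 1) (some (-2))
  let t := if PySem.Str.isIn "." t then PySem.List.pyGetD ((PySem.Str.split? t ".").getD []) 0 "" else t
  PySem.Str.strip t

def split_asm_functions (text_section_lines : List String) : List (String × List String) :=
  let st := text_section_lines.foldl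
    (fun (st : PySem.Dict String (List String) × Option String) line =>
      if pvIsHeader line then
        let n := pvName line
        (st.1.insert n [], some n)
      else
        match st.2 with
        | none => st
        | some c => (st.1.modify c [] (· ++ [line]), st.2))
    (PySem.Dict.empty, none)
  st.1.items

-- ===== PORT B =====
def split_asm_functions_alt (text_section_lines : List String) : List (String × List String) :=
  -- pending[::-1] is List.reverse (PySem.List.slice?_none_none_neg_one)
  let st := text_section_lines.reverse.foldl
    (fun (st : List (String × List String) × List String) line =>
      if pvIsHeader line then (st.1 ++ [(pvName line, st.2.reverse)], [])
      else (st.1, st.2 ++ [line]))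
    ([], [])
  (st.1.reverse.foldl (fun d p => d.insert p.1 p.2) PySem.Dict.empty).items

-- ===== PRECONDITION & SPEC =====
-- Pre_ excludes exactly the inputs on which A raises: a header line whose whitespace split
-- has fewer than two tokens makes line.split()[1] an IndexError (B raises there too).
def Pre_split_asm_functions (text_section_lines : List String) : Prop :=
  ∀ line ∈ text_section_lines, pvIsHeader line = true → 2 ≤ (PySem.Str.split₀ line).length

instance (text_section_lines : List String) : Decidable (Pre_split_asm_functions text_section_lines) := by
  unfold Pre_split_asm_functions; infer_instance

def pvWitness_split_asm_functions : List String :=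
  ["junk\n", "0000 <main>:\n", " mov eax\n", " ret\n", "0004 <f.cold>:\n", " nop\n"]

def Spec_split_asm_functions (text_section_lines : List String) (out : List (String × List String)) : Prop := out = split_asm_functions_alt text_section_lines
instance (text_section_lines : List String) (out : List (String × List String)) : Decidable (Spec_split_asm_functions text_section_lines out) := by unfold Spec_split_asm_functions; infer_instance

-- ===== CLAIM (what is proved, stated in full; the proofs are below) =====
def Claim_equal_split_asm_functions : Prop := ∀ (text_section_lines : List String), Dom_split_asm_functions text_section_lines → Pre_split_asm_functions text_section_lines → Spec_split_asm_functions text_section_lines (split_asm_functions text_section_lines)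

-- ===== LEMMAS AND PROOFS =====

-- proof-side segment collector: forward foldr form of B's backward pass
def pvCollect (ls : List String) : List (String × List String) × List String :=
  ls.foldr
    (fun line st =>
      if pvIsHeader line then ((pvName line, st.2) :: st.1, [])
      else (st.1, line :: st.2))
    ([], [])

-- abbreviation for building a dict from pairs
def pvDictFold (d : PySem.Dict String (List String)) (ps : List (String × List String)) : PySem.Dict String (List String) :=
  ps.foldl (fun d p => d.insert p.1 p.2) d

theorem pv_insert_insert_self (d : PySem.Dict String (List String)) (k : String) (a b : List String) :
    (d.insert k a).insert k b = d.insert k b := by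
  apply PySem.Dict.ext
  have h2 : (d.insert k a).contains k = true := PySem.Dict.contains_insert_self d k a
  by_cases h : d.contains k = true
  · simp only [PySem.Dict.insert, h, if_true] at h2 ⊢
    simp only [h2, if_true, List.map_map]
    apply List.map_congr_left
    intro p _
    by_cases hp : (p.1 == k) = true <;> simp [Function.comp, hp]
  · have hall : ∀ p ∈ d.items, (p.1 == k) = false := by
      intro p hp
      by_contra hc
      have hck : d.contains k = true := by
        simp only [PySem.Dict.contains, List.any_eq_true]
        exact ⟨p, hp, by simpa using hc⟩
      exact h hck
    have hid : d.items.map (fun p => if (p.1 == k) = true then (k, b) else p) = d.items := by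
      conv_rhs => rw [← List.map_id d.items]
      apply List.map_congr_left
      intro p hp
      simp [hall p hp]
    simp only [PySem.Dict.insert, h] at h2 ⊢
    simp only [Bool.false_eq_true, if_false] at h2 ⊢
    simp only [h2, if_true, List.map_append]
    rw [hid]
    simp

theorem pv_insert_getD_self (d : PySem.Dict String (List String)) (k : String) (dflt : List String)
    (h : d.contains k = true) (hn : d.keys.Nodup) :
    d.insert k (d.getD k dflt) = d := by
  apply PySem.Dict.ext
  simp only [PySem.Dict.insert, h, if_true]
  conv_rhs => rw [← List.map_id d.items]
  apply List.map_congr_left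
  intro p hp
  by_cases hpk : (p.1 == k) = true
  · have hk : p.1 = k := by simpa using hpk
    -- p is the unique entry with key k, so getD returns p.2
    have hfind : d.items.find? (fun q => q.1 == k) = some p := by
      apply List.find?_eq_some_iff_append.mpr
      refine ⟨hpk, ?_⟩
      obtain ⟨pre, suf, hsplit⟩ := List.append_of_mem hp
      refine ⟨pre, suf, hsplit, ?_⟩
      intro q hq
      have hnd := hn
      rw [PySem.Dict.keys] at hnd
      rw [hsplit] at hnd
      simp only [List.map_append, List.map_cons, List.nodup_append] at hnd
      have hne : q.1 ≠ p.1 :=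
        hnd.2.2 q.1 (List.mem_map_of_mem (f := fun x => x.1) hq) p.1 List.mem_cons_self
      simp [hk ▸ hne]
    simp [PySem.Dict.getD, PySem.Dict.get?, hfind, hk, Prod.ext_iff]
  · simp [hpk]

theorem pv_modify_modify (d : PySem.Dict String (List String)) (c : String) (x p : List String) :
    (d.modify c [] (· ++ x)).modify c [] (· ++ p) = d.modify c [] (· ++ (x ++ p)) := by
  simp only [PySem.Dict.modify, PySem.Dict.getD_insert_self]
  rw [pv_insert_insert_self, List.append_assoc]

theorem pv_contains_insert_of (d : PySem.Dict String (List String)) (k k' : String) (v : List String)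
    (h : d.contains k = true) : (d.insert k' v).contains k = true := by
  by_cases he : k = k'
  · subst he; exact PySem.Dict.contains_insert_self d k v
  · rw [PySem.Dict.contains_insert]
    simp [h]

-- the A loop from state (d, some c) produces: append all of c's pending lines, then process the segments
theorem pv_mainA_some (ls : List String) :
    ∀ (d : PySem.Dict String (List String)) (c : String),
      d.contains c = true → d.keys.Nodup →
      (ls.foldl
        (fun (st : PySem.Dict String (List String) × Option String) line =>
          if pvIsHeader line then
            (st.1.insert (pvName line) [], some (pvName line))
          else
            match st.2 with
            | none => st
            | some c => (st.1.modify c [] (· ++ [line]), st.2))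
        (d, some c)).1
      = pvDictFold (d.modify c [] (· ++ (pvCollect ls).2)) (pvCollect ls).1 := by
  induction ls with
  | nil =>
    intro d c hc hn
    simp only [List.foldl_nil, pvCollect, List.foldr_nil, pvDictFold, List.foldl_nil]
    rw [show (fun v => v ++ ([] : List String)) = fun v => v from by funext v; simp]
    simp only [PySem.Dict.modify]
    exact (pv_insert_getD_self d c [] hc hn).symm
  | cons l ls ih =>
    intro d c hc hn
    by_cases hl : pvIsHeader l = true
    · simp only [List.foldl_cons]
      rw [if_pos hl]
      rw [ih (d.insert (pvName l) []) (pvName l) (PySem.Dict.contains_insert_self d _ _)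
            (PySem.Dict.nodup_keys_insert d _ _ hn)]
      simp only [pvCollect, List.foldr_cons]
      rw [if_pos hl]
      show pvDictFold ((d.insert (pvName l) []).modify (pvName l) [] (· ++ (pvCollect ls).2)) (pvCollect ls).1
        = pvDictFold (d.modify c [] (· ++ [])) ((pvName l, (pvCollect ls).2) :: (pvCollect ls).1)
      rw [show (fun v => v ++ ([] : List String)) = fun v => v from by funext v; simp]
      simp only [PySem.Dict.modify, PySem.Dict.getD_insert_self]
      rw [pv_insert_insert_self, pv_insert_getD_self d c [] hc hn]
      simp only [pvDictFold, List.foldl_cons, List.nil_append]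
    · simp only [List.foldl_cons]
      rw [if_neg hl]
      rw [ih (d.modify c [] (· ++ [l])) c
            (by simpa only [PySem.Dict.modify] using pv_contains_insert_of d c c _ hc)
            (by simpa only [PySem.Dict.modify] using PySem.Dict.nodup_keys_insert d c _ hn)]
      simp only [pvCollect, List.foldr_cons]
      rw [if_neg hl]
      rw [pv_modify_modify]
      rfl

-- the A loop from state (d, none): pre-header lines are dropped, then the segments are processed
theorem pv_mainA_none (ls : List String) :
    ∀ (d : PySem.Dict String (List String)), d.keys.Nodup →
      (ls.foldl
        (fun (st : PySem.Dict String (List String) × Option String) line =>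
          if pvIsHeader line then
            (st.1.insert (pvName line) [], some (pvName line))
          else
            match st.2 with
            | none => st
            | some c => (st.1.modify c [] (· ++ [line]), st.2))
        (d, none)).1
      = pvDictFold d (pvCollect ls).1 := by
  induction ls with
  | nil => intro d _; rfl
  | cons l ls ih =>
    intro d hn
    by_cases hl : pvIsHeader l = true
    · simp only [List.foldl_cons]
      rw [if_pos hl]
      rw [pv_mainA_some ls (d.insert (pvName l) []) (pvName l)
            (PySem.Dict.contains_insert_self d _ _) (PySem.Dict.nodup_keys_insert d _ _ hn)]
      simp only [pvCollect, List.foldr_cons]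
      rw [if_pos hl]
      show pvDictFold ((d.insert (pvName l) []).modify (pvName l) [] (· ++ (pvCollect ls).2)) (pvCollect ls).1
        = pvDictFold d ((pvName l, (pvCollect ls).2) :: (pvCollect ls).1)
      simp only [PySem.Dict.modify, PySem.Dict.getD_insert_self]
      rw [pv_insert_insert_self]
      simp only [pvDictFold, List.foldl_cons, List.nil_append]
    · simp only [List.foldl_cons]
      rw [if_neg hl]
      have : (pvCollect (l :: ls)).1 = (pvCollect ls).1 := by
        simp only [pvCollect, List.foldr_cons]
        rw [if_neg hl]
      rw [this]
      exact ih d hn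

-- B's backward pass equals the foldr collector with the pairs reversed
theorem pv_revfold (ls : List String) :
    ls.reverse.foldl
      (fun (st : List (String × List String) × List String) line =>
        if pvIsHeader line then (st.1 ++ [(pvName line, st.2.reverse)], [])
        else (st.1, st.2 ++ [line]))
      ([], [])
    = ((pvCollect ls).1.reverse, (pvCollect ls).2.reverse) := by
  induction ls with
  | nil => rfl
  | cons l ls ih =>
    rw [List.reverse_cons, List.foldl_append, ih]
    simp only [List.foldl_cons, List.foldl_nil, pvCollect, List.foldr_cons]
    by_cases hl : pvIsHeader l = true <;> simp [hl]

-- ===== VERDICT (by name: the statement is the Claim_ definition above) =====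
theorem split_asm_functions_spec : Claim_equal_split_asm_functions := by
  intro ls _ _
  unfold Spec_split_asm_functions split_asm_functions split_asm_functions_alt
  rw [pv_revfold]
  simp only [List.reverse_reverse]
  have hempty : (PySem.Dict.empty : PySem.Dict String (List String)).keys.Nodup := by
    simp [PySem.Dict.empty, PySem.Dict.keys]
  rw [pv_mainA_none ls PySem.Dict.empty hempty]
  rfl
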